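-- pv_equiv track=rewrite | github.com/martin-krutsky/rubik-dl-symmetries | generate/generate_states.py | calculate_length_of_generators
-- ===== SOURCE A (Python) =====
-- from typing import Dict, List, Tuple
--
-- def calculate_length_of_generators(cube_generators: List[List[str]], double_moves_as_one: bool = True) -> List[int]:
--     '''
--     Calculate the lengths of `cube_generators` with the possibility to (not) count double moves as one.
--     '''
--     cube_gens_length = []
--     for generator in cube_generators:
--         gen_len = len(generator)
--         if double_moves_as_one:
--             notrem_flag = True
--             for i in range(1, len(generator)):
--                 if notrem_flag and generator[i-1] == generator[i]:
--                     gen_len -= 1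
--                     notrem_flag = False
--                 else:
--                     notrem_flag = True
--         cube_gens_length.append(gen_len)
--     return cube_gens_length
-- ===== SOURCE B (Python) =====
-- from typing import List
--
--
-- def _run_lengths(seq: List[str]) -> List[int]:
--     """Lengths of the maximal runs of consecutive equal elements."""
--     runs = []
--     i = 0
--     n = len(seq)
--     while i < n:
--         j = i + 1
--         while j < n and seq[j] == seq[i]:
--             j += 1
--         runs.append(j - i)
--         i = j
--     return runs
--
--
-- def calculate_length_of_generators(cube_generators: List[List[str]], double_moves_as_one: bool = True) -> List[int]:
--     if not double_moves_as_one: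
--         return [len(g) for g in cube_generators]
--     return [len(g) - sum(k // 2 for k in _run_lengths(g)) for g in cube_generators]
-- ===== Notes on version B (the rewrite author's own statement) =====
-- stated objective: idiomatic
-- what changed: Replaces A's flag-carrying index loop over adjacent pairs with a run-length decomposition: each generator's length minus sum(run_length // 2) over maximal runs of equal moves.
import Mathlib
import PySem

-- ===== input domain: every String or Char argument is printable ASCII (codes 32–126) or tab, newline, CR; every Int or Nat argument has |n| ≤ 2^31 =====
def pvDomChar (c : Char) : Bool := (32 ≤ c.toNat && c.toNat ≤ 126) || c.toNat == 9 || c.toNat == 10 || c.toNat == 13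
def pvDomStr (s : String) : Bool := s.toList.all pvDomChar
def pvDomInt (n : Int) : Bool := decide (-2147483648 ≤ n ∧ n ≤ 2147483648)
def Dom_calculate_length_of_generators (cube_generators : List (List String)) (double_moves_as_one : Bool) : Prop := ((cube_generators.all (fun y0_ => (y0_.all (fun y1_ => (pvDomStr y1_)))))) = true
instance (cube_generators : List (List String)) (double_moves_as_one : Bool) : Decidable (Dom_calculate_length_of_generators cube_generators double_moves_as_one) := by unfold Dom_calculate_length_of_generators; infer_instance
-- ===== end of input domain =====

-- B replaces A's flag-carrying index loop with a run-length decomposition (length minus k//2 per maximal run of equal moves); objective: idiomatic, same cost.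

-- ===== PORT A =====
def calculate_length_of_generators (cube_generators : List (List String)) (double_moves_as_one : Bool) : List Int :=
  cube_generators.foldl (fun cube_gens_length generator =>
    let gen_len : Int := generator.length
    let gen_len : Int :=
      if double_moves_as_one then
        ((PySem.List.pyRange 1 (generator.length : Int) 1).foldl
          (fun (s : Int × Bool) i =>
            if s.2 && (PySem.List.pyGetD generator (i - 1) "" == PySem.List.pyGetD generator i "")
            then (s.1 - 1, false) else (s.1, true))
          (gen_len, true)).1
      else gen_len
    cube_gens_length ++ [gen_len]) []

-- ===== PORT B =====
-- lengths of the maximal runs of consecutive equal elements (Source B's _run_lengths)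
def pvRunLengths (seq : List String) : List Nat :=
  match seq with
  | [] => []
  | x :: xs => ((xs.takeWhile (· == x)).length + 1) :: pvRunLengths (xs.dropWhile (· == x))
termination_by seq.length
decreasing_by
  simp only [List.length_cons]
  exact Nat.lt_succ_of_le (List.length_dropWhile_le _ _)

def calculate_length_of_generators_alt (cube_generators : List (List String)) (double_moves_as_one : Bool) : List Int :=
  if !double_moves_as_one then
    cube_generators.map (fun g => (g.length : Int))
  else
    cube_generators.map (fun g =>
      (g.length : Int) - (((pvRunLengths g).map (fun k => k / 2)).sum : Nat))

-- ===== PRECONDITION & SPEC =====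
def Spec_calculate_length_of_generators (cube_generators : List (List String)) (double_moves_as_one : Bool) (out : List Int) : Prop := out = calculate_length_of_generators_alt cube_generators double_moves_as_one
instance (cube_generators : List (List String)) (double_moves_as_one : Bool) (out : List Int) : Decidable (Spec_calculate_length_of_generators cube_generators double_moves_as_one out) := by unfold Spec_calculate_length_of_generators; infer_instance

-- ===== CLAIM (what is proved, stated in full; the proofs are below) =====
def Claim_equal_calculate_length_of_generators : Prop := ∀ (cube_generators : List (List String)) (double_moves_as_one : Bool), Dom_calculate_length_of_generators cube_generators double_moves_as_one → Spec_calculate_length_of_generators cube_generators double_moves_as_one (calculate_length_of_generators cube_generators double_moves_as_one)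

-- ===== LEMMAS AND PROOFS =====

-- A's inner loop body, named for the proofs (definitionally equal to the lambda in port A)
def pvStep (g : List String) (s : Int × Bool) (i : Int) : Int × Bool :=
  if s.2 && (PySem.List.pyGetD g (i - 1) "" == PySem.List.pyGetD g i "")
  then (s.1 - 1, false) else (s.1, true)

-- number of decrements A's inner loop performs on list g entering with flag `flag`
def pvCountRem : List String → Bool → Nat
  | [], _ => 0
  | [_], _ => 0
  | x :: y :: rest, flag =>
    if flag && (x == y) then 1 + pvCountRem (y :: rest) false else pvCountRem (y :: rest) true

theorem pvCountRem_cons₂ (a b : String) (L : List String) (f : Bool) :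
    pvCountRem (a :: b :: L) f
      = if f && (a == b) then 1 + pvCountRem (b :: L) false else pvCountRem (b :: L) true := rfl

theorem pvGetD_cons_succ (x : String) (xs : List String) (i : Int) (h : 0 ≤ i) (d : String) :
    PySem.List.pyGetD (x :: xs) (i + 1) d = PySem.List.pyGetD xs i d := by
  lift i to ℕ using h
  have e : ((i : Int) + 1) = ((i + 1 : ℕ) : Int) := by push_cast; ring
  rw [e, PySem.List.pyGetD_natCast, PySem.List.pyGetD_natCast]
  exact List.getD_cons_succ

theorem pvRange_shift (b : Int) :
    PySem.List.pyRange 2 (b + 1) 1 = (PySem.List.pyRange 1 b 1).map (· + 1) := by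
  rw [PySem.List.pyRange_one, PySem.List.pyRange_one, List.map_map]
  have e : b + 1 - 2 = b - 1 := by ring
  rw [e]
  apply List.map_congr_left
  intro k _
  simp
  ring

theorem pvShift (x : String) (xs : List String) (s : Int × Bool) :
    (PySem.List.pyRange 2 ((xs.length : Int) + 1) 1).foldl (pvStep (x :: xs)) s
      = (PySem.List.pyRange 1 (xs.length : Int) 1).foldl (pvStep xs) s := by
  rw [pvRange_shift, List.foldl_map]
  apply PySem.List.foldl_congr_mem
  intro acc i hi
  have h1 : 1 ≤ i := (PySem.List.mem_pyRange_one.mp hi).1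
  unfold pvStep
  have e1 : i + 1 - 1 = (i - 1) + 1 := by ring
  rw [e1, pvGetD_cons_succ x xs (i - 1) (by omega) "", pvGetD_cons_succ x xs i (by omega) ""]

theorem pvMaster : ∀ (g : List String) (v : Int) (flag : Bool),
    ((PySem.List.pyRange 1 (g.length : Int) 1).foldl (pvStep g) (v, flag)).1
      = v - pvCountRem g flag := by
  intro g
  induction g with
  | nil =>
    intro v flag
    rw [PySem.List.pyRange_one_eq_nil (by simp)]
    simp [pvCountRem]
  | cons x xs ih =>
    intro v flag
    match xs with
    | [] =>
      rw [PySem.List.pyRange_one_eq_nil (by simp)]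
      simp [pvCountRem]
    | y :: rest =>
      have hlen : ((x :: y :: rest).length : Int) = ((y :: rest).length : Int) + 1 := by
        push_cast [List.length_cons]
        ring
      rw [hlen, PySem.List.pyRange_one_cons (by push_cast [List.length_cons]; omega),
        List.foldl_cons]
      have h0 : PySem.List.pyGetD (x :: y :: rest) ((1 : Int) - 1) "" = x := by
        norm_num [PySem.List.pyGetD_zero_cons]
      have h1 : PySem.List.pyGetD (x :: y :: rest) (1 : Int) "" = y := by
        rw [show ((1 : Int)) = (((1 : ℕ)) : Int) by norm_num, PySem.List.pyGetD_natCast]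
        rfl
      have hfirst : pvStep (x :: y :: rest) (v, flag) 1
          = if flag && (x == y) then (v - 1, false) else (v, true) := by
        unfold pvStep
        rw [h0, h1]
      rw [hfirst]
      have h2 : (1 : Int) + 1 = 2 := by norm_num
      rw [h2, pvShift x (y :: rest), pvCountRem_cons₂]
      by_cases hf : (flag && (x == y)) = true
      · rw [if_pos hf, if_pos hf, ih (v - 1) false]
        push_cast
        ring
      · rw [if_neg hf, if_neg hf, ih v true]

-- within a run of m equal moves (followed by a different move or nothing),
-- A removes m/2 of them entering with flag true, (m-1)/2 entering with flag false
theorem pvRun : ∀ (m : Nat) (x : String) (r : List String),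
    (∀ h : r ≠ [], r.head h ≠ x) →
    pvCountRem (List.replicate m x ++ r) true = m / 2 + pvCountRem r true ∧
    (1 ≤ m → pvCountRem (List.replicate m x ++ r) false = (m - 1) / 2 + pvCountRem r true) := by
  intro m
  induction m using Nat.strong_induction_on with
  | _ m ih =>
    intro x r hr
    match m with
    | 0 => simp
    | 1 =>
      refine ⟨?_, fun _ => ?_⟩
      all_goals {
        simp only [List.replicate_succ, List.replicate_zero, List.nil_append, List.cons_append]
        match r, hr with
        | [], _ => simp [pvCountRem]
        | h :: t, hr =>
          have hne : (x == h) = false :=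
            beq_eq_false_iff_ne.mpr (fun e => (hr (by simp)) e.symm)
          rw [pvCountRem_cons₂, hne]
          simp
      }
    | (k + 2) =>
      have e2 : List.replicate (k + 2) x ++ r = x :: x :: (List.replicate k x ++ r) := by
        simp [List.replicate_succ]
      have e1 : List.replicate (k + 1) x ++ r = x :: (List.replicate k x ++ r) := by
        simp [List.replicate_succ]
      constructor
      · rw [e2, pvCountRem_cons₂, if_pos (by simp), ← e1,
          (ih (k + 1) (by omega) x r hr).2 (by omega)]
        omega
      · intro _
        rw [e2, pvCountRem_cons₂, if_neg (by simp), ← e1,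
          (ih (k + 1) (by omega) x r hr).1]
        omega

theorem pvSum (g : List String) :
    pvCountRem g true = ((pvRunLengths g).map (fun k => k / 2)).sum := by
  match g with
  | [] => simp [pvRunLengths, pvCountRem]
  | x :: xs =>
    have ih := pvSum (xs.dropWhile (· == x))
    have ht : xs.takeWhile (· == x) = List.replicate (xs.takeWhile (· == x)).length x := by
      rw [List.eq_replicate_iff]
      refine ⟨rfl, fun b hb => ?_⟩
      have := List.mem_takeWhile_imp hb
      simpa using this
    have hdecomp : x :: xs
        = List.replicate ((xs.takeWhile (· == x)).length + 1) x ++ xs.dropWhile (· == x) := by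
      rw [List.replicate_succ, List.cons_append]
      congr 1
      conv_lhs => rw [← List.takeWhile_append_dropWhile (p := (· == x)) (l := xs)]
      rw [← ht]
    have hhead : ∀ h : xs.dropWhile (· == x) ≠ [], (xs.dropWhile (· == x)).head h ≠ x := by
      intro h
      have := List.head_dropWhile_not (· == x) h
      simpa using this
    have hrun := (pvRun ((xs.takeWhile (· == x)).length + 1) x (xs.dropWhile (· == x)) hhead).1
    conv_lhs => rw [hdecomp]
    rw [hrun, ih, pvRunLengths]
    simp
termination_by g.length
decreasing_by
  simp only [List.length_cons]
  exact Nat.lt_succ_of_le (List.length_dropWhile_le _ _)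

-- ===== VERDICT (by name: the statement is the Claim_ definition above) =====
theorem calculate_length_of_generators_spec : Claim_equal_calculate_length_of_generators := by
  intro cgs dbl _
  unfold Spec_calculate_length_of_generators
  unfold calculate_length_of_generators calculate_length_of_generators_alt
  rw [PySem.List.foldl_append_singleton_eq_map, List.nil_append]
  cases dbl with
  | false => simp
  | true =>
    simp only [Bool.not_true, if_true, Bool.false_eq_true, if_false]
    apply List.map_congr_left
    intro g _
    show ((PySem.List.pyRange 1 (g.length : Int) 1).foldl (pvStep g) ((g.length : Int), true)).1 = _
    rw [pvMaster, pvSum]
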